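-- pv_equiv track=rewrite | github.com/droPeReis/Toxic-Model-Detection-NLP-local | src/ml/models/spacy.py | _contiguous_ranges
-- ===== SOURCE A (Python) =====
-- from typing import List, Union, Set
-- import itertools
--
-- def _contiguous_ranges(span_list: List[int]):
--     """Extracts continguous runs [1, 2, 3, 5, 6, 7] -> [(1,3), (5,7)].
--
--     Args:
--     - span_list: a list of span indicies
--
--     Returns:
--     - A list of tuples containing the start and end of each continguous run.
--     """
--     output = []
--     for _, span in itertools.groupby(
--         enumerate(span_list), lambda p: p[1] - p[0]
--     ):
--         span = list(span)
--         output.append((span[0][1], span[-1][1]))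
--     return output
-- ===== SOURCE B (Python) =====
-- def _contiguous_ranges(span_list):
--     """Extracts contiguous runs [1, 2, 3, 5, 6, 7] -> [(1,3), (5,7)]."""
--     if not span_list:
--         return []
--     output = []
--     start = prev = span_list[0]
--     for x in span_list[1:]:
--         if x == prev + 1:
--             prev = x
--         else:
--             output.append((start, prev))
--             start = prev = x
--     output.append((start, prev))
--     return output
-- ===== Notes on version B (the rewrite author's own statement) =====
-- stated objective: simpler
-- what changed: Replaces itertools.groupby over enumerate (with a value-minus-index key and materialising each group as a list) by a single explicit pass that maintains the current run's start and previous element and flushes a (start, prev) pair at each break and at the end.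
import Mathlib
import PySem

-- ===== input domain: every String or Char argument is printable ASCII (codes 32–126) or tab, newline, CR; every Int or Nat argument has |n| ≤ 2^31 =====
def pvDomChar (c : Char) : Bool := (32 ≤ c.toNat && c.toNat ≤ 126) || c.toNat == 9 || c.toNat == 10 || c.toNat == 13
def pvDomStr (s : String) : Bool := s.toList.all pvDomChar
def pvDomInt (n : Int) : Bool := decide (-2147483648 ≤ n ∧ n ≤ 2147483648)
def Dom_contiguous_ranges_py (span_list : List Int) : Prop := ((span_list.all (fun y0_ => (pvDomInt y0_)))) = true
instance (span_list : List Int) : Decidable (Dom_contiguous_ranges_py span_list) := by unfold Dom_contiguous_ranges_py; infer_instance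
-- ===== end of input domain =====

-- B replaces itertools.groupby over enumerate by one explicit pass tracking the
-- current run's start and previous element (objective: simpler).

-- ===== PORT A =====
-- enumerate(span_list) starting at index i (Python's enumerate is enumFromA 0).
def enumFromA (i : Int) : List Int → List (Int × Int)
  | [] => []
  | x :: xs => (i, x) :: enumFromA (i + 1) xs

-- itertools.groupby with key p[1] - p[0]: consecutive elements with equal key
-- form one group (each group returned as a list, as A does with list(span)).
def pushGroup (p : Int × Int) : List (List (Int × Int)) → List (List (Int × Int))
  | [] => [[p]]
  | [] :: gs => [p] :: gs          -- unreachable: groups are never empty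
  | (q :: g) :: gs =>
    if p.2 - p.1 = q.2 - q.1 then (p :: q :: g) :: gs else [p] :: (q :: g) :: gs

def groupbyDiff : List (Int × Int) → List (List (Int × Int))
  | [] => []
  | p :: ps => pushGroup p (groupbyDiff ps)

-- span[0][1] / span[-1][1]; every group is nonempty, so the default is never used.
def headVal (g : List (Int × Int)) : Int := (g.headD (0, 0)).2
def lastVal (g : List (Int × Int)) : Int := (g.getLastD (0, 0)).2

def contiguous_ranges_py (span_list : List Int) : List (Int × Int) :=
  (groupbyDiff (enumFromA 0 span_list)).foldl
    (fun output span => output ++ [(headVal span, lastVal span)]) []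

-- ===== PORT B =====
def altLoop (start prev : Int) : List Int → List (Int × Int)
  | [] => [(start, prev)]
  | x :: xs => if x = prev + 1 then altLoop start x xs
               else (start, prev) :: altLoop x x xs

def contiguous_ranges_py_alt (span_list : List Int) : List (Int × Int) :=
  match span_list with
  | [] => []
  | x :: xs => altLoop x x xs

-- ===== PRECONDITION & SPEC =====
def Spec_contiguous_ranges_py (span_list : List Int) (out : List (Int × Int)) : Prop := out = contiguous_ranges_py_alt span_list
instance (span_list : List Int) (out : List (Int × Int)) : Decidable (Spec_contiguous_ranges_py span_list out) := by unfold Spec_contiguous_ranges_py; infer_instance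

-- ===== CLAIM (what is proved, stated in full; the proofs are below) =====
def Claim_equal_contiguous_ranges_py : Prop := ∀ (span_list : List Int), Dom_contiguous_ranges_py span_list → Spec_contiguous_ranges_py span_list (contiguous_ranges_py span_list)

-- ===== LEMMAS AND PROOFS =====

-- the A-side loop's appends amount to a map over the groups
theorem foldl_append_map (l : List (List (Int × Int))) (acc : List (Int × Int)) :
    l.foldl (fun output span => output ++ [(headVal span, lastVal span)]) acc
      = acc ++ l.map (fun g => (headVal g, lastVal g)) := by
  induction l generalizing acc with
  | nil => simp
  | cons g gs ih => simp [List.foldl, ih]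

def outA (gs : List (List (Int × Int))) : List (Int × Int) :=
  gs.map (fun g => (headVal g, lastVal g))

-- the first group of the enumeration of x :: xs starts with (i, x)
theorem groupby_head (xs : List Int) : ∀ (i x : Int),
    ∃ g gs, groupbyDiff (enumFromA i (x :: xs)) = ((i, x) :: g) :: gs := by
  induction xs with
  | nil => intro i x; exact ⟨[], [], rfl⟩
  | cons y ys ih =>
    intro i x
    obtain ⟨g, gs, hg⟩ := ih (i + 1) y
    have e1 : groupbyDiff (enumFromA i (x :: y :: ys))
        = pushGroup (i, x) (groupbyDiff (enumFromA (i + 1) (y :: ys))) := rfl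
    by_cases hk : (x : Int) - i = (i + 1, y).2 - (i + 1, y).1
    · exact ⟨(i + 1, y) :: g, gs, by rw [e1, hg]; simp [pushGroup, hk]⟩
    · exact ⟨[], ((i + 1, y) :: g) :: gs, by rw [e1, hg]; simp [pushGroup, hk]⟩

-- one step of groupby: (i, prev) merges into the next group iff x = prev + 1
theorem groupby_step (i prev x : Int) (xs : List Int) (g : List (Int × Int))
    (gs : List (List (Int × Int)))
    (hg : groupbyDiff (enumFromA (i + 1) (x :: xs)) = ((i + 1, x) :: g) :: gs) :
    groupbyDiff (enumFromA i (prev :: x :: xs)) =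
      if x = prev + 1 then ((i, prev) :: (i + 1, x) :: g) :: gs
      else [(i, prev)] :: ((i + 1, x) :: g) :: gs := by
  have e1 : groupbyDiff (enumFromA i (prev :: x :: xs))
      = pushGroup (i, prev) (groupbyDiff (enumFromA (i + 1) (x :: xs))) := rfl
  by_cases h : x = prev + 1
  · have hk : prev - i = (x : Int) - (i + 1) := by omega
    rw [e1, hg, if_pos h]; simp [pushGroup, hk]
  · have hk : ¬ (prev - i = (x : Int) - (i + 1)) := by omega
    rw [e1, hg, if_neg h]; simp [pushGroup, hk]

-- core invariant: on prev :: xs (enumerated from i) the groups' output starts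
-- with (prev, e) for some run-end e, and B's loop yields (start, e) with the
-- same tail.
theorem core (xs : List Int) : ∀ (i prev start : Int),
    ∃ e r, outA (groupbyDiff (enumFromA i (prev :: xs))) = (prev, e) :: r ∧
           altLoop start prev xs = (start, e) :: r := by
  induction xs with
  | nil =>
    intro i prev start
    exact ⟨prev, [], by simp [enumFromA, groupbyDiff, pushGroup, outA, headVal, lastVal], by simp [altLoop]⟩
  | cons x xs ih =>
    intro i prev start
    obtain ⟨g, gs, hg⟩ := groupby_head xs (i + 1) x
    have hstep := groupby_step i prev x xs g gs hg
    by_cases h : x = prev + 1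
    · obtain ⟨e, r, hA, hB⟩ := ih (i + 1) x start
      rw [hg] at hA
      refine ⟨e, r, ?_, ?_⟩
      · rw [hstep, if_pos h]
        simp only [outA, List.map, headVal, lastVal, List.headD, List.getLastD] at hA ⊢
        simpa using hA
      · subst h; simp [altLoop, hB]
    · obtain ⟨e, r, hA, hB⟩ := ih (i + 1) x x
      rw [hg] at hA
      refine ⟨prev, (x, e) :: r, ?_, ?_⟩
      · rw [hstep, if_neg h]
        simp only [outA, List.map, headVal, lastVal, List.headD, List.getLastD] at hA ⊢
        simpa using hA
      · simp [altLoop, h, hB]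

-- ===== VERDICT (by name: the statement is the Claim_ definition above) =====
theorem contiguous_ranges_py_spec : Claim_equal_contiguous_ranges_py := by
  intro span_list _
  unfold Spec_contiguous_ranges_py contiguous_ranges_py contiguous_ranges_py_alt
  cases span_list with
  | nil => simp [enumFromA, groupbyDiff]
  | cons x xs =>
    obtain ⟨e, r, hA, hB⟩ := core xs 0 x x
    rw [foldl_append_map]
    simpa [outA] using hA.trans hB.symm
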